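-- pv_equiv track=rewrite | github.com/claudio525/dd_ucnz | encn404.py | assign_running_count
-- ===== SOURCE A (Python) =====
-- from collections import Counter
--
-- def assign_running_count(input_sequence):
--     counts = Counter(input_sequence)
--     unique_values_with_counts = list(counts.items())
--
--     output_sequence = []
--     for value in input_sequence:
--         count = counts[value]
--         output_sequence.append(count)
--         counts[value] -= 1
--
--     return output_sequence
-- ===== SOURCE B (Python) =====
-- def assign_running_count(input_sequence):
--     seen = {}
--     out = []
--     for value in reversed(input_sequence):
--         c = seen.get(value, 0) + 1
--         seen[value] = c
--         out.append(c)
--     out.reverse()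
--     return out
-- ===== Notes on version B (the rewrite author's own statement) =====
-- stated objective: faster
-- what changed: Replaces the Counter-then-decrement two-phase pass with a single right-to-left sweep that increments a running seen-count per value and reverses the collected output.
import Mathlib
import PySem

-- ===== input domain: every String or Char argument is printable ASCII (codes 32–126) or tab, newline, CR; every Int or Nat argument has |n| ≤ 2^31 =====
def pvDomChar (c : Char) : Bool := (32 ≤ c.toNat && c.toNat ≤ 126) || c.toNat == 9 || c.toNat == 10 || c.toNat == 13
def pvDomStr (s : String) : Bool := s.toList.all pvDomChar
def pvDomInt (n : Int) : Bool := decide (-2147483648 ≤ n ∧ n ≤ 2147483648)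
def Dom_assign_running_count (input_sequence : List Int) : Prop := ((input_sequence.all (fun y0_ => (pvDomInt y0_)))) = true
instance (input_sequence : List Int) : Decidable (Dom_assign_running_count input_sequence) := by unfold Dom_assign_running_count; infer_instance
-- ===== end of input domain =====

-- B replaces A's Counter-then-decrement two-phase pass with one right-to-left sweep that
-- increments a running seen-count per value (single sweep instead of count-then-decrement).

-- ===== PORT A =====
-- A's 'for value in input_sequence' loop: read counts[value], append it, decrement counts[value]
def pvALoop (counts : PySem.Dict Int Int) : List Int → List Int
  | [] => []
  | v :: rest =>
      let c := counts.getD v 0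
      c :: pvALoop (counts.insert v (c - 1)) rest

def assign_running_count (input_sequence : List Int) : List Int :=
  let counts := PySem.Dict.counter input_sequence
  let _unique_values_with_counts := counts.items   -- unused in A, kept for faithfulness
  pvALoop counts input_sequence

-- ===== PORT B =====
-- one step of B's loop body: bump the seen-count of v and append it to out
def pvBStep (st : List Int × PySem.Dict Int Int) (v : Int) : List Int × PySem.Dict Int Int :=
  let c := st.2.getD v 0 + 1
  (st.1 ++ [c], st.2.insert v c)

def assign_running_count_alt (input_sequence : List Int) : List Int :=
  ((input_sequence.reverse.foldl pvBStep ([], PySem.Dict.empty)).1).reverse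

-- ===== PRECONDITION & SPEC =====
def Spec_assign_running_count (input_sequence : List Int) (out : List Int) : Prop := out = assign_running_count_alt input_sequence
instance (input_sequence : List Int) (out : List Int) : Decidable (Spec_assign_running_count input_sequence out) := by unfold Spec_assign_running_count; infer_instance

-- ===== CLAIM (what is proved, stated in full; the proofs are below) =====
def Claim_equal_assign_running_count : Prop := ∀ (input_sequence : List Int), Dom_assign_running_count input_sequence → Spec_assign_running_count input_sequence (assign_running_count input_sequence)

-- ===== LEMMAS AND PROOFS =====

-- each element paired with (count of it in the rest of the list) + 1 — the common spec
def pvSuff : List Int → List Int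
  | [] => []
  | x :: xs => ((xs.count x : Int) + 1) :: pvSuff xs

-- B's sweep with the processed-so-far elements made explicit as a list zs
def pvRC : List Int → List Int → List Int
  | [], _ => []
  | y :: ys, zs => ((zs.count y : Int) + 1) :: pvRC ys (y :: zs)

theorem pvALoop_eq_suff : ∀ (xs : List Int) (d : PySem.Dict Int Int),
    (∀ v, d.getD v 0 = (xs.count v : Int)) → pvALoop d xs = pvSuff xs := by
  intro xs
  induction xs with
  | nil => intro d _; rfl
  | cons x xs ih =>
      intro d h
      have hx := h x
      simp [List.count_cons_self] at hx
      simp only [pvALoop, pvSuff, hx]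
      congr 1
      apply ih
      intro v
      rw [PySem.Dict.getD_insert]
      by_cases hv : v = x
      · subst hv; rw [if_pos rfl]; ring
      · rw [if_neg hv, h v]
        simp [Ne.symm hv]

-- the foldl's first component: previously emitted output ++ the counts still to come
theorem pvB_foldl_eq_rc : ∀ (ys : List Int) (out zs : List Int) (d : PySem.Dict Int Int),
    (∀ v, d.getD v 0 = (zs.count v : Int)) →
    (ys.foldl pvBStep (out, d)).1 = out ++ pvRC ys zs := by
  intro ys
  induction ys with
  | nil => intro out zs d _; simp [pvRC]
  | cons y ys ih =>
      intro out zs d h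
      simp only [List.foldl_cons, pvBStep, h y, pvRC]
      rw [ih (out ++ [(zs.count y : Int) + 1]) (y :: zs)]
      · simp
      · intro v
        rw [PySem.Dict.getD_insert]
        by_cases hv : v = y
        · subst hv; rw [if_pos rfl, List.count_cons_self]; push_cast; ring
        · rw [if_neg hv, h v]
          simp [Ne.symm hv]

theorem pvRC_snoc : ∀ (ys : List Int) (x : Int) (zs : List Int),
    pvRC (ys ++ [x]) zs = pvRC ys zs ++ [((ys.reverse ++ zs).count x : Int) + 1] := by
  intro ys x
  induction ys with
  | nil => intro zs; simp [pvRC]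
  | cons y ys ih =>
      intro zs
      simp only [List.cons_append, pvRC, ih (y :: zs), List.cons_append]
      congr 3
      simp [List.count_append, List.count_cons]

theorem pvRC_reverse : ∀ (xs : List Int), pvRC xs.reverse [] = (pvSuff xs).reverse := by
  intro xs
  induction xs with
  | nil => rfl
  | cons x xs ih =>
      simp only [List.reverse_cons, pvRC_snoc, ih, pvSuff, List.reverse_cons]
      congr 2
      simp

theorem aPort_eq_suff (xs : List Int) : assign_running_count xs = pvSuff xs := by
  unfold assign_running_count
  apply pvALoop_eq_suff
  intro v
  exact PySem.Dict.getD_counter xs v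

theorem bPort_eq_suff (xs : List Int) : assign_running_count_alt xs = pvSuff xs := by
  unfold assign_running_count_alt
  rw [pvB_foldl_eq_rc xs.reverse [] [] PySem.Dict.empty
        (by intro v; simp [PySem.Dict.getD, PySem.Dict.empty, PySem.Dict.get?])]
  rw [List.nil_append, pvRC_reverse, List.reverse_reverse]

-- ===== VERDICT (by name: the statement is the Claim_ definition above) =====
theorem assign_running_count_spec : Claim_equal_assign_running_count := by
  intro xs _
  unfold Spec_assign_running_count
  rw [aPort_eq_suff, bPort_eq_suff]
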